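-- pv_equiv track=rewrite | github.com/fangdu64/BDT | bdtPy/bdtUtil.py | getSortedRefNames
-- ===== SOURCE A (Python) =====
-- def getSortedRefNames(refNames):
--     regRefNames=[]
--     for ref in refNames:
--         if len(ref)==4 and ref[3].isdigit():
--             regRefNames.append('chr0'+ref[3])
--         else:
--             regRefNames.append(ref)
--     regRefNames.sort()
--
--     for i in range(len(regRefNames)):
--         regRefNames[i] = regRefNames[i].replace('chr0', 'chr')
--
--     return regRefNames
-- ===== SOURCE B (Python) =====
-- def getSortedRefNames(refNames):
--     # Single pass: maintain a sorted list of sort-keys and a parallel list of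
--     # final (already un-padded) output names, inserting each element at its
--     # stable position found by binary search (after all equal keys).
--     keys = []
--     outs = []
--     for ref in refNames:
--         k = 'chr0' + ref[3] if len(ref) == 4 and ref[3].isdigit() else ref
--         lo, hi = 0, len(keys)
--         while lo < hi:
--             mid = (lo + hi) // 2
--             if keys[mid] <= k:
--                 lo = mid + 1
--             else:
--                 hi = mid
--         keys.insert(lo, k)
--         outs.insert(lo, k.replace('chr0', 'chr'))
--     return outs
-- ===== Notes on version B (the rewrite author's own statement) =====
-- stated objective: alternative
-- what changed: Replaces A's three staged passes (build a padded copy, sort it with list.sort, un-pad every element in an index loop) by one left-to-right online binary-insertion pass that maintains a sorted list of sort-keys and a parallel list of already-un-padded output names, inserting each element at its stable position; no call to sort() and no separate replace pass.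
import Mathlib
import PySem

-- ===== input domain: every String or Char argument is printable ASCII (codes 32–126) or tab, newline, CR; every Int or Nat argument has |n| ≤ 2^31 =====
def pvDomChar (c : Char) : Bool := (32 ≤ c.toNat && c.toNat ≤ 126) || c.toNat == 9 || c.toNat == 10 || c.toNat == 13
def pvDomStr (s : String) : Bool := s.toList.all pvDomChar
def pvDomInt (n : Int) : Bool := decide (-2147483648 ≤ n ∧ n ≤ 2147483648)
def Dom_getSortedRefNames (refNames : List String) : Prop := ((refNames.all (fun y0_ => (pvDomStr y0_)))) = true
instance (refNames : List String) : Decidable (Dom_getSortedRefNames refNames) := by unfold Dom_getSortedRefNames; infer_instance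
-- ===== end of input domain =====

-- B replaces A's build/sort()/un-pad passes by one online stable binary-insertion pass over (key, output) pairs; equal output.

-- ===== PORT A =====
def getSortedRefNames (refNames : List String) : List String :=
  -- first loop: build regRefNames by appending the (possibly padded) name
  let regRefNames := refNames.foldl (fun acc ref =>
    acc ++ [if PySem.Str.len ref = 4 then
              (match PySem.Str.pyGet? ref 3 with
               | some c => if PySem.Str.isdigit c then String.mk ['c','h','r','0',c] else ref
               | none => ref)
            else ref]) []
  -- regRefNames.sort()
  let regRefNames := PySem.List.sorted regRefNames (fun x => x) false
  -- second loop: regRefNames[i] = regRefNames[i].replace('chr0','chr')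
  regRefNames.map (fun s => PySem.Str.replace s "chr0" "chr")

-- ===== PORT B =====
-- B's key expression: 'chr0' + ref[3] if len(ref) == 4 and ref[3].isdigit() else ref
def pvKey (r : String) : String :=
  if PySem.Str.len r = 4 then
    (match PySem.Str.pyGet? r 3 with
     | some c => if PySem.Str.isdigit c then String.mk ['c','h','r','0',c] else r
     | none => r)
  else r

-- B's while loop: lo, hi = 0, len(keys); while lo < hi: mid=(lo+hi)//2; …
-- lo/hi/mid are nonnegative Python ints, so they are ported as Nat ('//2' = Nat./ here);
-- keys[mid] is always in range (0 ≤ lo ≤ mid < hi ≤ len), ported as getD with an unused default.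
def pvBisect (keys : List String) (k : String) (lo hi : Nat) : Nat :=
  if _h : lo < hi then
    let mid := (lo + hi) / 2
    if keys.getD mid "" ≤ k then pvBisect keys k (mid + 1) hi
    else pvBisect keys k lo mid
  else lo
termination_by hi - lo
decreasing_by all_goals omega

def getSortedRefNames_alt (refNames : List String) : List String :=
  (refNames.foldl (fun (st : List String × List String) ref =>
      let k := pvKey ref
      let i := pvBisect st.1 k 0 st.1.length
      (PySem.List.insert st.1 (i : Int) k,
       PySem.List.insert st.2 (i : Int) (PySem.Str.replace k "chr0" "chr")))
    ([], [])).2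

-- ===== PRECONDITION & SPEC =====
def Spec_getSortedRefNames (refNames : List String) (out : List String) : Prop := out = getSortedRefNames_alt refNames
instance (refNames : List String) (out : List String) : Decidable (Spec_getSortedRefNames refNames out) := by unfold Spec_getSortedRefNames; infer_instance

-- ===== CLAIM =====
def Claim_equal_getSortedRefNames : Prop := ∀ (refNames : List String), Dom_getSortedRefNames refNames → Spec_getSortedRefNames refNames (getSortedRefNames refNames)

-- ===== LEMMAS AND PROOFS =====

-- the linear-scan insertion position (proof-only reference point for pvBisect)
def pvInsPos (keys : List String) (k : String) : Nat :=
  match keys with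
  | [] => 0
  | x :: xs => if x ≤ k then pvInsPos xs k + 1 else 0

theorem pvInsPos_le (keys : List String) (k : String) : pvInsPos keys k ≤ keys.length := by
  induction keys with
  | nil => simp [pvInsPos]
  | cons x xs ih => by_cases h : x ≤ k <;> simp [pvInsPos, h] <;> omega

-- pvInsPos is the unique boundary: everything before it is ≤ k, the element at it (if any) is not
theorem pvInsPos_eq (keys : List String) (k : String) (r : Nat) (hr : r ≤ keys.length)
    (h1 : ∀ j (hj : j < keys.length), j < r → keys[j] ≤ k)
    (h2 : ∀ (hlt : r < keys.length), ¬ keys[r] ≤ k) :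
    pvInsPos keys k = r := by
  induction keys generalizing r with
  | nil => simp at hr; simp [pvInsPos, hr]
  | cons x xs ih =>
    by_cases h : x ≤ k
    · match r with
      | 0 => exact absurd h (h2 (by simp))
      | r + 1 =>
        simp only [pvInsPos, if_pos h, Nat.add_right_cancel_iff]
        exact ih r (by simpa using hr)
          (fun j hj hjr => by simpa using h1 (j+1) (by simpa using hj) (by omega))
          (fun hlt => by simpa using h2 (by simpa using hlt))
    · match r with
      | 0 => simp [pvInsPos, h]
      | r + 1 => exact absurd (h1 0 (by simp) (by omega)) h

-- binary search on a sorted list lands on that boundary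
theorem pvBisect_spec (keys : List String) (k : String)
    (hs : keys.Pairwise (fun a b => a ≤ b)) (lo hi : Nat)
    (hlohi : lo ≤ hi) (hhi : hi ≤ keys.length)
    (h1 : ∀ j (hj : j < keys.length), j < lo → keys[j] ≤ k)
    (h2 : ∀ j (hj : j < keys.length), hi ≤ j → ¬ keys[j] ≤ k) :
    pvBisect keys k lo hi ≤ keys.length ∧
    (∀ j (hj : j < keys.length), j < pvBisect keys k lo hi → keys[j] ≤ k) ∧
    (∀ (hlt : pvBisect keys k lo hi < keys.length), ¬ keys[pvBisect keys k lo hi] ≤ k) := by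
  induction lo, hi using pvBisect.induct keys k with
  | case1 lo hi h mid hle ih =>
    have hmid : mid < keys.length := by omega
    have hle' : keys[mid] ≤ k := by
      simpa [List.getD_eq_getElem?_getD, List.getElem?_eq_getElem hmid] using hle
    rw [pvBisect]
    simp only [dif_pos h]
    rw [show ((lo + hi) / 2) = mid from rfl, if_pos hle]
    refine ih (by omega) hhi ?_ h2
    intro j hj hjm
    rcases Nat.lt_or_ge j mid with hj' | hj'
    · exact le_trans ((List.pairwise_iff_getElem.mp hs) j mid hj hmid hj') hle'
    · have : j = mid := by omega
      subst this; exact hle'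
  | case2 lo hi h mid hle ih =>
    have hmid : mid < keys.length := by omega
    rw [pvBisect]
    simp only [dif_pos h]
    rw [show ((lo + hi) / 2) = mid from rfl, if_neg hle]
    refine ih (by omega) (by omega) h1 ?_
    intro j hj hmj hcon
    have hmj' : keys[mid] ≤ keys[j] := by
      rcases Nat.lt_or_ge mid j with hlt | hge
      · exact (List.pairwise_iff_getElem.mp hs) mid j hmid hj hlt
      · have : mid = j := by omega
        subst this; exact le_refl _
    exact hle (by
      simpa [List.getD_eq_getElem?_getD, List.getElem?_eq_getElem hmid] using
        le_trans hmj' hcon)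
  | case3 lo hi h =>
    rw [pvBisect]
    simp only [dif_neg h]
    have hlo : lo = hi := by omega
    subst hlo
    exact ⟨by omega, fun j hj hjl => h1 j hj hjl, fun hlt => h2 lo hlt (by omega)⟩

theorem pvBisect_eq_insPos (keys : List String) (k : String)
    (hs : keys.Pairwise (fun a b => a ≤ b)) :
    pvBisect keys k 0 keys.length = pvInsPos keys k := by
  obtain ⟨hle, h1, h2⟩ := pvBisect_spec keys k hs 0 keys.length (by omega) (le_refl _)
    (fun j hj hj0 => absurd hj0 (by omega)) (fun j hj hjl => absurd hj (by omega))
  exact (pvInsPos_eq keys k _ hle h1 h2).symm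

-- inserting at the scanned position is exactly the stable insertBy of the sort
theorem pv_insert_insPos (keys : List String) (k : String) :
    PySem.List.insert keys ((pvInsPos keys k : Nat) : Int) k
      = PySem.List.insertBy (fun a b => decide (a < b)) k keys := by
  induction keys with
  | nil => simp [pvInsPos, PySem.List.insert_zero, PySem.List.insertBy]
  | cons x xs ih =>
    by_cases h : x ≤ k
    · have hlt : ¬ (k < x) := not_lt.mpr h
      rw [pvInsPos, if_pos h,
          PySem.List.insert_natCast _ _ _ (by simpa using pvInsPos_le xs k)]
      simp only [List.take_succ_cons, List.drop_succ_cons, List.cons_append]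
      rw [← PySem.List.insert_natCast _ _ _ (pvInsPos_le xs k), ih]
      simp [PySem.List.insertBy, hlt]
    · have hlt : k < x := not_le.mp h
      rw [pvInsPos, if_neg h]
      simp [PySem.List.insert_zero, PySem.List.insertBy, hlt]

-- stable insertion keeps the list sorted
theorem pairwise_le_insertBy (k : String) (K : List String)
    (h : K.Pairwise (fun a b => a ≤ b)) :
    (PySem.List.insertBy (fun a b => decide (a < b)) k K).Pairwise (fun a b => a ≤ b) := by
  induction K with
  | nil => simp [PySem.List.insertBy]
  | cons y ys ih =>
    rcases List.pairwise_cons.mp h with ⟨hy, hys⟩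
    by_cases hk : k < y
    · simp only [PySem.List.insertBy, decide_eq_true_eq, if_pos hk]
      refine List.pairwise_cons.mpr ⟨?_, h⟩
      intro a ha
      have : a = y ∨ a ∈ ys := by simpa using ha
      rcases this with rfl | ha'
      · exact le_of_lt hk
      · exact le_trans (le_of_lt hk) (hy a ha')
    · simp only [PySem.List.insertBy, decide_eq_true_eq, if_neg hk]
      refine List.pairwise_cons.mpr ⟨?_, ih hys⟩
      intro a ha
      rcases (PySem.List.mem_insertBy _ _ _ _).mp ha with rfl | ha
      · exact not_lt.mp hk
      · exact hy a ha

-- map commutes with positional insert (position within range)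
theorem pv_map_insert (f : String → String) (keys : List String) (i : Nat) (hi : i ≤ keys.length) (k : String) :
    (PySem.List.insert keys (i : Int) k).map f
      = PySem.List.insert (keys.map f) (i : Int) (f k) := by
  rw [PySem.List.insert_natCast _ _ _ hi,
      PySem.List.insert_natCast _ _ _ (by simpa using hi)]
  simp

-- mapping f over an insertion by the f-key order is the insertion of f x by the plain order
theorem pv_map_insertBy {α κ : Type} [LT κ] [DecidableLT κ] (f : α → κ) (x : α) (acc : List α) :
    (PySem.List.insertBy (fun a b => decide (f a < f b)) x acc).map f
      = PySem.List.insertBy (fun a b => decide (a < b)) (f x) (acc.map f) := by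
  induction acc with
  | nil => rfl
  | cons y ys ih =>
    by_cases h : f x < f y <;> simp [PySem.List.insertBy, h, ih]

-- a stable key-sort commutes with mapping the key: sorted(map f xs) = map f (sorted(xs, key=f))
theorem pv_sorted_map_key {α κ : Type} [LT κ] [DecidableLT κ] (f : α → κ) (xs : List α) :
    PySem.List.sorted (xs.map f) (fun x => x) false = (PySem.List.sorted xs f false).map f := by
  rw [PySem.List.sorted_eq_foldl_insertBy, PySem.List.sorted_eq_foldl_insertBy]
  suffices h : ∀ (acc : List α),
      (xs.map f).foldl (fun acc x => PySem.List.insertBy (fun a b => decide (a < b)) x acc) (acc.map f)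
        = (xs.foldl (fun acc x => PySem.List.insertBy (fun a b => decide (f a < f b)) x acc) acc).map f by
    simpa using h []
  induction xs with
  | nil => intro acc; rfl
  | cons x xs ih =>
    intro acc
    simp only [List.map_cons, List.foldl_cons]
    rw [← pv_map_insertBy, ih]

-- B's loop invariant: keys stays sorted, outs is always the replace-image of keys,
-- and keys is the running stable insertion sort of the key images
theorem pv_loop (xs : List String) (K : List String) (hK : K.Pairwise (fun a b => a ≤ b)) :
    xs.foldl (fun (st : List String × List String) ref =>
      let k := pvKey ref
      let i := pvBisect st.1 k 0 st.1.length
      (PySem.List.insert st.1 (i : Int) k,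
       PySem.List.insert st.2 (i : Int) (PySem.Str.replace k "chr0" "chr")))
      (K, K.map (fun s => PySem.Str.replace s "chr0" "chr"))
    = (let S := xs.foldl (fun acc x =>
          PySem.List.insertBy (fun a b => decide (a < b)) (pvKey x) acc) K
       (S, S.map (fun s => PySem.Str.replace s "chr0" "chr"))) := by
  induction xs generalizing K with
  | nil => rfl
  | cons x xs ih =>
    simp only [List.foldl_cons, pvBisect_eq_insPos K (pvKey x) hK]
    rw [show (PySem.List.insert (K.map (fun s => PySem.Str.replace s "chr0" "chr"))
          ((pvInsPos K (pvKey x) : Nat) : Int) (PySem.Str.replace (pvKey x) "chr0" "chr"))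
        = (PySem.List.insert K ((pvInsPos K (pvKey x) : Nat) : Int) (pvKey x)).map
            (fun s => PySem.Str.replace s "chr0" "chr") from
      (pv_map_insert _ K _ (pvInsPos_le K (pvKey x)) (pvKey x)).symm]
    rw [pv_insert_insPos K (pvKey x)]
    exact ih _ (pairwise_le_insertBy _ _ hK)

-- ===== VERDICT =====
theorem getSortedRefNames_spec : Claim_equal_getSortedRefNames := by
  intro refNames _
  show getSortedRefNames refNames = getSortedRefNames_alt refNames
  unfold getSortedRefNames getSortedRefNames_alt
  rw [PySem.List.foldl_append_singleton_eq_map]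
  have hpad : (fun ref => if PySem.Str.len ref = 4 then
              (match PySem.Str.pyGet? ref 3 with
               | some c => if PySem.Str.isdigit c then String.mk ['c','h','r','0',c] else ref
               | none => ref)
            else ref) = pvKey := rfl
  rw [hpad]
  simp only [List.nil_append]
  rw [pv_sorted_map_key pvKey refNames]
  have := pv_loop refNames [] (by simp)
  simp only [List.map_nil] at this
  rw [this]
  have h1 : List.foldl (fun acc x =>
        PySem.List.insertBy (fun a b => decide (a < b)) x acc) [] (refNames.map pvKey)
      = List.foldl (fun acc x =>
        PySem.List.insertBy (fun a b => decide (a < b)) (pvKey x) acc) [] refNames :=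
    List.foldl_map (f := pvKey) (l := refNames)
  have h2 : PySem.List.sorted (refNames.map pvKey) (fun x => x) false
      = List.foldl (fun acc x =>
        PySem.List.insertBy (fun a b => decide (a < b)) x acc) [] (refNames.map pvKey) :=
    PySem.List.sorted_eq_foldl_insertBy (refNames.map pvKey) (fun x => x)
  have hfold : List.foldl (fun acc x =>
        PySem.List.insertBy (fun a b => decide (a < b)) (pvKey x) acc) [] refNames
      = List.map pvKey (PySem.List.sorted refNames pvKey false) := by
    rw [← h1, ← h2, pv_sorted_map_key]
  rw [← hfold]
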